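-- pv_equiv track=rewrite | github.com/stilyantanev/Programming101-v3 | week1/1-Warmups/p_score.py | p_score
-- ===== SOURCE A (Python) =====
-- def p_score(n):
--     n = str(n)
--     is_palindrome = True
--
--     if len(n) == 1:
--         return 1
--     else:
--         first_index = 0
--         second_index = len(n) // 2
--         while first_index < second_index:
--             if n[first_index] != n[len(n) - first_index - 1]:
--                 is_palindrome = False
--                 reverse_n = int(n[::-1])
--                 score = 1 + p_score(int(n) + reverse_n)
--                 return score
--             first_index += 1
--
--     if is_palindrome:
--         return 1
-- ===== SOURCE B (Python) =====
-- def p_score(n):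
--     # Iterative reverse-and-add: count starts at 1 and counts each add step.
--     value = n
--     count = 1
--     s = str(value)
--     while s != s[::-1]:
--         value += int(s[::-1])
--         count += 1
--         s = str(value)
--     return count
-- ===== Notes on version B (the rewrite author's own statement) =====
-- stated objective: simpler
-- what changed: Replaces the recursion with a manual half-length index-comparison palindrome scan by a plain iterative loop that compares str(value) with its reverse and counts the add steps.
import Mathlib
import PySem

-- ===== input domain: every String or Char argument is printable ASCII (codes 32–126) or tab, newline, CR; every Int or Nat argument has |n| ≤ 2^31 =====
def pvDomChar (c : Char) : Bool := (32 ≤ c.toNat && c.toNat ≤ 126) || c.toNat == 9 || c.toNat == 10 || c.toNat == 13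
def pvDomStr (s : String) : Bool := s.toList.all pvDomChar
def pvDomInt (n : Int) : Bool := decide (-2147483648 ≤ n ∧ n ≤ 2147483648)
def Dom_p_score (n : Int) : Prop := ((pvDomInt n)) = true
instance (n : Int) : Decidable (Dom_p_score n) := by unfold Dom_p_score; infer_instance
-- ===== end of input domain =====

-- B replaces A's recursion-with-manual-half-length-index-scan by a plain iterative
-- reverse-and-add loop comparing str(value) with its reverse and counting the steps.

-- ===== PORT A =====
-- the `while first_index < second_index` scan for the first mismatched character pair
-- (both Python indexings are always in range here: i < len/2 and 0 ≤ len-i-1 < len)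
def pScoreMis (L : List Char) (i : Nat) : Bool :=
  if i < L.length / 2 then
    if L[i]? ≠ L[L.length - i - 1]? then true
    else pScoreMis L (i + 1)
  else false
termination_by L.length / 2 - i

-- fuel = Python's recursion limit; Pre_p_score guarantees it is never exhausted
def pScoreA : Nat → Int → Int
  | 0, _ => 0
  | fuel + 1, n =>
    let s := PySem.Int.toChars n        -- n = str(n)
    if s.length = 1 then 1
    else if pScoreMis s 0 then
      -- mismatch branch: reverse_n = int(n[::-1]); ValueError (none) is excluded by Pre_
      match PySem.Int.ofChars? s.reverse with
      | none => 0
      | some r => 1 + pScoreA fuel (n + r)   -- int(str(n)) = n for an int n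
    else 1

def p_score (n : Int) : Int := pScoreA 300 n

-- ===== PORT B =====
-- the while loop of Source B: state (value, count), fuel as above
def pScoreB : Nat → Int → Int → Int
  | 0, _, count => count
  | fuel + 1, value, count =>
    let s := PySem.Int.toChars value
    if s ≠ s.reverse then
      match PySem.Int.ofChars? s.reverse with   -- int(s[::-1]); none excluded by Pre_
      | none => count
      | some r => pScoreB fuel (value + r) (count + 1)
    else count

def p_score_alt (n : Int) : Int := pScoreB 300 n 1

-- ===== PRECONDITION & SPEC =====
def pvPal (v : Int) : Bool := decide ((PySem.Int.toChars v).reverse = PySem.Int.toChars v)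
def pvStep (v : Int) : Int := v + (PySem.Int.ofChars? (PySem.Int.toChars v).reverse).getD 0

-- Pre_ excludes exactly the inputs on which A raises: every negative n (int of the
-- reversed string, which ends in the minus sign, is a ValueError) and reverse-and-add
-- sequences that never reach a palindrome (A overflows the recursion stack; B loops
-- forever). The step bound in Pre_ is far above what any terminating input of the
-- domain needs, so no returning input is excluded.
def Pre_p_score (n : Int) : Prop := ∃ k ∈ List.range 300, pvPal (pvStep^[k] n) = true
instance (n : Int) : Decidable (Pre_p_score n) := by unfold Pre_p_score; infer_instance

def pvWitness_p_score : Int := (89)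

def Spec_p_score (n : Int) (out : Int) : Prop := out = p_score_alt n
instance (n : Int) (out : Int) : Decidable (Spec_p_score n out) := by unfold Spec_p_score; infer_instance

-- ===== CLAIM (what is proved, stated in full; the proofs are below) =====
def Claim_equal_p_score : Prop := ∀ (n : Int), Dom_p_score n → Pre_p_score n → Spec_p_score n (p_score n)

-- ===== LEMMAS AND PROOFS =====

-- the mismatch scan returns false iff every pair it would inspect matches
theorem pScoreMis_false_iff (L : List Char) (i : Nat) :
    pScoreMis L i = false ↔ ∀ j, i ≤ j → j < L.length / 2 → L[j]? = L[L.length - j - 1]? := by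
  fun_induction pScoreMis L i with
  | case1 i h hne =>
    constructor
    · intro hf; exact absurd hf (by simp)
    · intro hall; exact absurd (hall i le_rfl h) hne
  | case2 i h hne ih =>
    rw [ih]
    constructor
    · intro hall j hij hj
      rcases Nat.eq_or_lt_of_le hij with rfl | hlt
      · exact not_ne_iff.mp hne
      · exact hall j hlt hj
    · intro hall j hij hj; exact hall j (Nat.le_of_succ_le hij) hj
  | case3 i h =>
    constructor
    · intro _ j hij hj; omega
    · intro _; rfl

-- a list is a palindrome iff the first half matches the mirrored second half
theorem reverse_eq_iff_half (L : List Char) :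
    L.reverse = L ↔ ∀ j, j < L.length / 2 → L[j]? = L[L.length - j - 1]? := by
  constructor
  · intro hrev j hj
    have hil : L.length - j - 1 < L.length := by omega
    have h1 : L.reverse[L.length - j - 1]? = L[L.length - 1 - (L.length - j - 1)]? :=
      List.getElem?_reverse hil
    rw [hrev] at h1
    rw [show L.length - 1 - (L.length - j - 1) = j from by omega] at h1
    exact h1.symm
  · intro hall
    apply List.ext_getElem?
    intro i
    by_cases h2 : i < L.length
    · rw [List.getElem?_reverse h2]
      by_cases hi : i < L.length / 2
      · rw [show L.length - 1 - i = L.length - i - 1 from by omega]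
        exact (hall i hi).symm
      · by_cases hj : L.length - 1 - i < L.length / 2
        · have := hall (L.length - 1 - i) hj
          rw [show L.length - (L.length - 1 - i) - 1 = i from by omega] at this
          exact this
        · rw [show L.length - 1 - i = i from by omega]
    · rw [List.getElem?_eq_none (by simpa using Nat.le_of_not_lt h2),
          List.getElem?_eq_none (by omega)]

-- a one-character string is a palindrome
theorem reverse_eq_of_length_one {L : List Char} (h : L.length = 1) : L.reverse = L := by
  rcases List.length_eq_one_iff.mp h with ⟨a, rfl⟩
  rfl

-- shifting the count accumulator of B's loop
theorem pScoreB_count_succ (f : Nat) : ∀ (v c : Int), pScoreB f v (c + 1) = 1 + pScoreB f v c := by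
  induction f with
  | zero => intro v c; simp [pScoreB]; ring
  | succ f ih =>
    intro v c
    simp only [pScoreB]
    split
    · cases h : PySem.Int.ofChars? (PySem.Int.toChars v).reverse with
      | none => ring
      | some r => exact ih (v + r) (c + 1)
    · ring

-- if int(reversed) raises, reverse-and-add from v is stuck at v
theorem pvStep_fixed {v : Int} (h : PySem.Int.ofChars? (PySem.Int.toChars v).reverse = none) :
    pvStep v = v := by simp [pvStep, h]

-- main invariant: with enough fuel the two loops agree
theorem pScoreA_eq_pScoreB (f : Nat) :
    ∀ (v : Int), (∃ k < f, pvPal (pvStep^[k] v) = true) → pScoreA f v = pScoreB f v 1 := by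
  induction f with
  | zero => intro v ⟨k, hk, _⟩; omega
  | succ f ih =>
    intro v ⟨k, hk, hpal⟩
    simp only [pScoreA, pScoreB]
    by_cases hrev : (PySem.Int.toChars v).reverse = PySem.Int.toChars v
    · -- palindrome: both sides return 1
      rw [if_neg (show ¬(PySem.Int.toChars v ≠ (PySem.Int.toChars v).reverse) from by simp [hrev])]
      by_cases hlen : (PySem.Int.toChars v).length = 1
      · rw [if_pos hlen]
      · rw [if_neg hlen]
        have hmis : pScoreMis (PySem.Int.toChars v) 0 = false :=
          (pScoreMis_false_iff _ 0).mpr (fun j _ hj => (reverse_eq_iff_half _).mp hrev j hj)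
        rw [hmis]
        simp
    · -- not a palindrome: one add step on each side
      have hv0 : pvPal v = false := by simp [pvPal, hrev]
      have hk0 : k ≠ 0 := by
        intro h; rw [h] at hpal; simp only [Function.iterate_zero, id_eq] at hpal
        rw [hpal] at hv0; simp at hv0
      rw [if_pos (show PySem.Int.toChars v ≠ (PySem.Int.toChars v).reverse from fun h => hrev h.symm)]
      have hlen : (PySem.Int.toChars v).length ≠ 1 := fun h => hrev (reverse_eq_of_length_one h)
      rw [if_neg hlen]
      have hmis : pScoreMis (PySem.Int.toChars v) 0 = true := by
        rcases Bool.eq_false_or_eq_true (pScoreMis (PySem.Int.toChars v) 0) with hf | ht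
        · exact hf
        · exact absurd ((reverse_eq_iff_half _).mpr
            (fun j hj => ((pScoreMis_false_iff _ 0).mp ht) j (Nat.zero_le _) hj)) hrev
      rw [hmis, if_pos rfl]
      cases hof : PySem.Int.ofChars? (PySem.Int.toChars v).reverse with
      | none =>
        -- excluded: the sequence would be stuck at the non-palindrome v
        exfalso
        have hfix := Function.iterate_fixed (pvStep_fixed hof) k
        rw [hfix, hv0] at hpal
        simp at hpal
      | some r =>
        show 1 + pScoreA f (v + r) = pScoreB f (v + r) (1 + 1)
        have hstep : pvStep v = v + r := by simp [pvStep, hof]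
        obtain ⟨k', rfl⟩ : ∃ k', k = k' + 1 := ⟨k - 1, by omega⟩
        have hpal' : pvPal (pvStep^[k'] (v + r)) = true := by
          rw [← hstep, ← Function.iterate_succ_apply]; exact hpal
        rw [ih (v + r) ⟨k', by omega, hpal'⟩, pScoreB_count_succ]

-- ===== VERDICT (by name: the statement is the Claim_ definition above) =====
theorem p_score_spec : Claim_equal_p_score := by
  intro n _ hpre
  obtain ⟨k, hk, hp⟩ := hpre
  unfold Spec_p_score p_score p_score_alt
  exact pScoreA_eq_pScoreB 300 n ⟨k, List.mem_range.mp hk, hp⟩
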